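-- pv_equiv track=rewrite | github.com/Maxzett/TP_Truco_Pygame | modules/auxiliares.py | calcular_puntaje_envido
-- ===== SOURCE A (Python) =====
-- def calcular_puntaje_envido(cartas: list) -> int:
--     #dict de equivalencias para envido
--     valores = {1: 1, 2: 2, 3: 3, 4: 4, 5: 5, 6: 6, 7: 7, 10: 0, 11: 0, 12: 0}
--     palos = {}
--
--     for valor, palo in cartas:
--         if palo not in palos:
--             palos[palo] = []
--         palos[palo].append(valores[valor])
--
--     max_puntaje = 0
--     for palo, cartas_palo in palos.items():
--         if len(cartas_palo) > 1:
--             cartas_palo.sort(reverse=True)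
--             max_puntaje = max(max_puntaje, 20 + cartas_palo[0] + cartas_palo[1])
--         else:
--             max_puntaje = max(max_puntaje, cartas_palo[0])
--
--     return max_puntaje
-- ===== SOURCE B (Python) =====
-- def calcular_puntaje_envido(cartas: list) -> int:
--     valores = {1: 1, 2: 2, 3: 3, 4: 4, 5: 5, 6: 6, 7: 7, 10: 0, 11: 0, 12: 0}
--     vals = [(valores[valor], palo) for valor, palo in cartas]
--     best = 0
--     for i, (vi, pi) in enumerate(vals):
--         best = max(best, vi)
--         for vj, pj in vals[i + 1:]:
--             if pi == pj:
--                 best = max(best, 20 + vi + vj)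
--     return best
-- ===== Notes on version B (the rewrite author's own statement) =====
-- stated objective: alternative
-- what changed: Replaces the per-suit grouping dict plus per-group descending sort with a direct pairwise scan: map each card to its envido value once, then take the maximum over 0, all single values, and 20+vi+vj for every same-suit pair.
import Mathlib
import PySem

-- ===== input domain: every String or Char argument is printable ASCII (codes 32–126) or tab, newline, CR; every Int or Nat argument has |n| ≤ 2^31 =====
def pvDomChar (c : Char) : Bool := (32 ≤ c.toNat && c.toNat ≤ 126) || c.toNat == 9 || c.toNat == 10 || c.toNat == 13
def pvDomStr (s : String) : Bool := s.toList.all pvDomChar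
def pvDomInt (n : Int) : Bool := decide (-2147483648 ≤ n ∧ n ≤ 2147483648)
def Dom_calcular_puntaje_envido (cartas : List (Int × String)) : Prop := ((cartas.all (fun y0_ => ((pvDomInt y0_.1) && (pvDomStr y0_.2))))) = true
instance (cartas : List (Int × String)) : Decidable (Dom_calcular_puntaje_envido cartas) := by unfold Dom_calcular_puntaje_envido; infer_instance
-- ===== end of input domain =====

-- B replaces A's per-suit grouping dict and per-group descending sort with a direct pairwise
-- scan over the envido values (max over 0, all single values, and same-suit pair sums);
-- Pre_ excludes card values outside the envido table, on which the Python A raises KeyError.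


-- ===== PORT A =====
-- the literal dict 'valores' of both Pythons
def envDict : PySem.Dict Int Int :=
  PySem.Dict.ofList [(1, 1), (2, 2), (3, 3), (4, 4), (5, 5), (6, 6), (7, 7), (10, 0), (11, 0), (12, 0)]

-- valores[valor]; Python raises KeyError on a missing key (excluded by Pre_), the port returns 0 there
def envVal (v : Int) : Int := (envDict.get? v).getD 0

-- A's first loop: build the dict palo -> list of envido values, appended in card order
def buildPalos (cartas : List (Int × String)) : PySem.Dict String (List Int) :=
  cartas.foldl
    (fun palos c =>
      let palos := if palos.contains c.2 then palos else palos.insert c.2 []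
      palos.modify c.2 [] (fun l => l ++ [envVal c.1]))
    PySem.Dict.empty

-- the body of A's second loop, one item (palo, cartas_palo) at a time
def stepA (m : Int) (pg : String × List Int) : Int :=
  if (pg.2.length : Int) > 1 then
    let gs := PySem.List.sorted pg.2 (fun x => x) true
    max m (20 + (PySem.List.pyGet? gs 0).getD 0 + (PySem.List.pyGet? gs 1).getD 0)
  else
    max m ((PySem.List.pyGet? pg.2 0).getD 0)

def calcular_puntaje_envido (cartas : List (Int × String)) : Int :=
  (buildPalos cartas).items.foldl stepA 0

-- ===== PORT B =====
-- vals = [(valores[valor], palo) for valor, palo in cartas]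
def valsOf (cartas : List (Int × String)) : List (Int × String) :=
  cartas.map (fun c => (envVal c.1, c.2))

-- body of B's outer loop: best = max(best, vi); then the inner loop over vals[i+1:]
def stepB (vals : List (Int × String)) (best : Int) (ip : Int × (Int × String)) : Int :=
  (PySem.List.slice vals (some (ip.1 + 1)) none).foldl
    (fun b c => if ip.2.2 == c.2 then max b (20 + ip.2.1 + c.1) else b)
    (max best ip.2.1)

def calcular_puntaje_envido_alt (cartas : List (Int × String)) : Int :=
  (PySem.List.enumerate (valsOf cartas)).foldl (stepB (valsOf cartas)) 0

-- ===== PRECONDITION & SPEC =====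
-- Pre_ excludes exactly the cards whose value is not a key of 'valores': there the Python A
-- (and the Python B alike) raises KeyError instead of returning.
def Pre_calcular_puntaje_envido (cartas : List (Int × String)) : Prop :=
  ∀ c ∈ cartas, c.1 ∈ ([1, 2, 3, 4, 5, 6, 7, 10, 11, 12] : List Int)
instance (cartas : List (Int × String)) : Decidable (Pre_calcular_puntaje_envido cartas) := by
  unfold Pre_calcular_puntaje_envido; infer_instance

def pvWitness_calcular_puntaje_envido : (List (Int × String)) :=
  [(7, "oro"), (6, "oro"), (3, "copa")]

def Spec_calcular_puntaje_envido (cartas : List (Int × String)) (out : Int) : Prop := out = calcular_puntaje_envido_alt cartas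
instance (cartas : List (Int × String)) (out : Int) : Decidable (Spec_calcular_puntaje_envido cartas out) := by unfold Spec_calcular_puntaje_envido; infer_instance

-- ===== CLAIM (what is proved, stated in full; the proofs are below) =====
def Claim_equal_calcular_puntaje_envido : Prop := ∀ (cartas : List (Int × String)), Dom_calcular_puntaje_envido cartas → Pre_calcular_puntaje_envido cartas → Spec_calcular_puntaje_envido cartas (calcular_puntaje_envido cartas)

-- ===== LEMMAS AND PROOFS =====

-- ---- generic bounds for foldl over Int accumulators ----
theorem foldl_le_of {α : Type} (f : Int → α → Int) (K : Int) (l : List α) (a : Int)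
    (ha : a ≤ K) (hf : ∀ b x, x ∈ l → b ≤ K → f b x ≤ K) : l.foldl f a ≤ K := by
  induction l generalizing a with
  | nil => exact ha
  | cons x t ih =>
    exact ih (f a x) (hf a x (by simp) ha) (fun b y hy hb => hf b y (by simp [hy]) hb)

theorem le_foldl_of {α : Type} (f : Int → α → Int) (l : List α) (a : Int)
    (hf : ∀ b x, b ≤ f b x) : a ≤ l.foldl f a := by
  induction l generalizing a with
  | nil => exact le_refl a
  | cons x t ih => exact le_trans (hf a x) (ih (f a x))

theorem foldl_reach {α : Type} (f : Int → α → Int) (l1 l2 : List α) (x : α) (a v : Int)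
    (hf : ∀ b y, b ≤ f b y) (hx : ∀ b, v ≤ f b x) : v ≤ (l1 ++ x :: l2).foldl f a := by
  rw [List.foldl_append, List.foldl_cons]
  exact le_trans (hx _) (le_foldl_of f l2 _ hf)

-- ---- pair sublists vs. index pairs ----
theorem sublist_pair_indices {α : Type} {x y : α} {l : List α} (h : [x, y].Sublist l) :
    ∃ i j, i < j ∧ ∃ hj : j < l.length, ∃ hi : i < l.length, l[i] = x ∧ l[j] = y := by
  induction l with
  | nil => simp at h
  | cons z t ih =>
    rcases h with _ | ⟨_, _⟩
    · rename_i h'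
      obtain ⟨i, j, hij, hj, hi, hx, hy⟩ := ih h'
      exact ⟨i+1, j+1, by omega, by simp; omega, by simp; omega, by simpa using hx, by simpa using hy⟩
    · rename_i h'
      have : y ∈ t := by
        have := h'.subset; simp at this; exact this
      obtain ⟨j, hj, hy⟩ := List.mem_iff_getElem.mp this
      exact ⟨0, j+1, by omega, by simp; omega, by simp, by simp, by simpa using hy⟩

theorem pair_indices_sublist {α : Type} (l : List α) (i j : Nat) (hij : i < j) (hj : j < l.length) :
    [l[i]'(by omega), l[j]].Sublist l := by
  induction l generalizing i j with
  | nil => simp at hj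
  | cons z t ih =>
    cases i with
    | zero =>
      cases j with
      | zero => omega
      | succ j' =>
        simp only [List.getElem_cons_zero, List.getElem_cons_succ]
        refine List.Sublist.cons₂ z ?_
        rw [List.singleton_sublist]
        exact List.getElem_mem (by simpa using hj)
    | succ i' =>
      cases j with
      | zero => omega
      | succ j' =>
        simp only [List.getElem_cons_succ]
        exact (ih i' j' (by omega) (by simpa using hj)).cons z

-- ---- the top two of a descending-sorted list bound every pair drawn from it ----
theorem two_max_bound (g0 g1 : Int) (t : List Int) (x y : Int)
    (hpw : (g0 :: g1 :: t).Pairwise (fun a b => b ≤ a))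
    (hsub : [x, y].Subperm (g0 :: g1 :: t)) : x + y ≤ g0 + g1 := by
  have hmem : ∀ z ∈ ([x,y] : List Int), z ∈ g0 :: g1 :: t := fun z hz => hsub.subset hz
  have hg0 : ∀ z ∈ g0 :: g1 :: t, z ≤ g0 := by
    intro z hz
    rcases List.mem_cons.mp hz with rfl | hz'
    · exact le_refl _
    · exact (List.pairwise_cons.mp hpw).1 z hz'
  have ht : ∀ z ∈ t, z ≤ g1 := (List.pairwise_cons.mp (List.pairwise_cons.mp hpw).2).1
  have hx0 : x ≤ g0 := hg0 x (hmem x (by simp))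
  have hy0 : y ≤ g0 := hg0 y (hmem y (by simp))
  have hmin : min x y ≤ g1 := by
    by_contra hc
    push Not at hc
    have hcx : g1 < x := lt_of_lt_of_le hc (min_le_left x y)
    have hcy : g1 < y := lt_of_lt_of_le hc (min_le_right x y)
    have hcount := hsub.countP_le (fun z => decide (g1 < z))
    have h2 : ([x,y] : List Int).countP (fun z => decide (g1 < z)) = 2 := by
      simp [hcx, hcy]
    have hlt : (g0 :: g1 :: t).countP (fun z => decide (g1 < z)) ≤ 1 := by
      simp only [List.countP_cons]
      have h0 : t.countP (fun z => decide (g1 < z)) = 0 := by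
        rw [List.countP_eq_zero]
        intro z hz
        simpa using not_lt.mpr (ht z hz)
      simp [h0]
      split_ifs <;> omega
    omega
  have := max_add_min x y
  have hmax : max x y ≤ g0 := by simp [hx0, hy0]
  omega

-- ---- the envido value table ----
theorem envVal_bounds (v : Int) : 0 ≤ envVal v ∧ envVal v ≤ 7 := by
  have h : envDict.items = [(1, 1), (2, 2), (3, 3), (4, 4), (5, 5), (6, 6), (7, 7), (10, 0), (11, 0), (12, 0)] := by decide
  unfold envVal PySem.Dict.get?
  rw [h]
  simp only [List.find?]
  repeat' split
  all_goals simp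

-- ---- characterisation of A's dict: the suit groups in first-appearance order ----
-- the group of envido values of suit p, in card order (what buildPalos stores under p)
def grp (cartas : List (Int × String)) (p : String) : List Int :=
  (cartas.filter (fun c => c.2 == p)).map (fun c => envVal c.1)

-- the suits of cartas, first occurrence first (the dict's key order)
def suitsOf (cartas : List (Int × String)) : List String :=
  PySem.List.dedup (cartas.map (fun c => c.2))

def groupItems (cartas : List (Int × String)) : List (String × List Int) :=
  (suitsOf cartas).map (fun p => (p, grp cartas p))

theorem grp_append_singleton (l : List (Int × String)) (c : Int × String) (p : String) :
    grp (l ++ [c]) p = grp l p ++ (if c.2 == p then [(envVal c.1)] else []) := by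
  unfold grp
  rw [List.filter_append, List.map_append]
  congr 1
  by_cases h : c.2 == p <;> simp [List.filter, h]

theorem mem_suitsOf {l : List (Int × String)} {p : String} :
    p ∈ suitsOf l ↔ ∃ c ∈ l, c.2 = p := by
  unfold suitsOf
  rw [PySem.List.mem_dedup]
  simp [eq_comm]

theorem grp_eq_nil_of_not_mem {l : List (Int × String)} {p : String} (h : p ∉ suitsOf l) :
    grp l p = [] := by
  unfold grp
  rw [List.filter_eq_nil_iff.mpr, List.map_nil]
  intro c hc hbeq
  exact h (mem_suitsOf.mpr ⟨c, hc, by simpa using hbeq⟩)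

theorem find?_groupItems (l : List (Int × String)) (p : String) (hp : p ∈ suitsOf l) :
    ((groupItems l).find? (fun pr => pr.1 == p)) = some (p, grp l p) := by
  unfold groupItems
  generalize suitsOf l = s at *
  induction s with
  | nil => simp at hp
  | cons a t ih =>
    by_cases h : a = p
    · subst h; simp
    · rw [List.map_cons, List.find?_cons_of_neg (by simp [h])]
      exact ih (by rcases List.mem_cons.mp hp with h' | h' <;> simp_all)

theorem find?_groupItems_none (l : List (Int × String)) (p : String) (hp : p ∉ suitsOf l) :
    ((groupItems l).find? (fun pr => pr.1 == p)) = none := by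
  rw [List.find?_eq_none]
  intro pr hpr
  unfold groupItems at hpr
  obtain ⟨q, hq, rfl⟩ := List.mem_map.mp hpr
  intro hbe
  have hqp : q = p := by simpa using hbe
  exact hp (hqp ▸ hq)

theorem contains_groupItems (l : List (Int × String)) (p : String) :
    (PySem.Dict.mk (groupItems l)).contains p = decide (p ∈ suitsOf l) := by
  unfold PySem.Dict.contains groupItems
  simp only [PySem.Dict.items]
  rw [List.any_map, Bool.eq_iff_iff]
  simp [Function.comp_def]

theorem suitsOf_append_mem (l : List (Int × String)) (c : Int × String) (hc : c.2 ∈ suitsOf l) :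
    suitsOf (l ++ [c]) = suitsOf l := by
  unfold suitsOf at *
  rw [List.map_append, List.map_cons, List.map_nil,
    PySem.List.dedup_eq_ofList, PySem.List.dedup_eq_ofList, PySem.Set.ofList_append_singleton,
    PySem.Set.add_of_mem (by simpa [PySem.List.dedup_eq_ofList] using hc)]

theorem suitsOf_append_not_mem (l : List (Int × String)) (c : Int × String) (hc : c.2 ∉ suitsOf l) :
    suitsOf (l ++ [c]) = suitsOf l ++ [c.2] := by
  unfold suitsOf at *
  rw [List.map_append, List.map_cons, List.map_nil,
    PySem.List.dedup_eq_ofList, PySem.List.dedup_eq_ofList, PySem.Set.ofList_append_singleton,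
    PySem.Set.add_of_not_mem (by simpa [PySem.List.dedup_eq_ofList] using hc)]

theorem step_items (l : List (Int × String)) (c : Int × String) (d : PySem.Dict String (List Int))
    (hd : d.items = groupItems l) :
    ((if d.contains c.2 then d else d.insert c.2 []).modify c.2 [] (fun g => g ++ [envVal c.1])).items
      = groupItems (l ++ [c]) := by
  obtain ⟨items⟩ := d
  simp only [PySem.Dict.items] at hd
  subst hd
  by_cases hc : c.2 ∈ suitsOf l
  · rw [if_pos (by rw [contains_groupItems]; simpa using hc)]
    unfold PySem.Dict.modify
    have hget : (PySem.Dict.mk (groupItems l)).getD c.2 [] = grp l c.2 := by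
      unfold PySem.Dict.getD PySem.Dict.get?
      rw [find?_groupItems l c.2 hc]
      rfl
    rw [hget, PySem.Dict.items_insert_of_contains _ _ (by rw [contains_groupItems]; simpa using hc)]
    unfold groupItems
    rw [suitsOf_append_mem l c hc, List.map_map]
    apply List.map_congr_left
    intro p hp
    by_cases hpc : p = c.2
    · subst hpc
      simp only [Function.comp_def, BEq.rfl, if_pos]
      rw [grp_append_singleton, if_pos (by simp)]
    · simp only [Function.comp_def]
      rw [if_neg (by simpa using (Ne.symm (fun h => hpc h.symm))), grp_append_singleton,
        if_neg (by simpa using fun h => hpc h.symm)]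
      simp
  · rw [if_neg (by rw [contains_groupItems]; simpa using hc)]
    unfold PySem.Dict.modify
    have hnotin : (PySem.Dict.mk (groupItems l)).contains c.2 = false := by
      rw [contains_groupItems]; simpa using hc
    have hins : ((PySem.Dict.mk (groupItems l)).insert c.2 []).items = groupItems l ++ [(c.2, [])] :=
      PySem.Dict.items_insert_of_not_contains _ _ hnotin
    have hget : ((PySem.Dict.mk (groupItems l)).insert c.2 []).getD c.2 [] = [] := by
      unfold PySem.Dict.getD PySem.Dict.get?
      rw [hins, List.find?_append, find?_groupItems_none l c.2 hc]
      simp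
    rw [hget]
    have hcon : ((PySem.Dict.mk (groupItems l)).insert c.2 []).contains c.2 = true := by
      unfold PySem.Dict.contains
      rw [hins]
      simp
    rw [PySem.Dict.items_insert_of_contains _ _ hcon, hins]
    unfold groupItems
    rw [suitsOf_append_not_mem l c hc, List.map_append, List.map_append, List.map_map]
    congr 1
    · apply List.map_congr_left
      intro p hp
      have hpc : p ≠ c.2 := fun h => hc (h ▸ hp)
      simp only [Function.comp_def]
      rw [if_neg (by simpa using hpc), grp_append_singleton,
        if_neg (by simpa using fun h => hpc h.symm)]
      simp
    · simp only [List.map_cons, List.map_nil, BEq.rfl, if_pos]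
      rw [grp_append_singleton, if_pos (by simp), grp_eq_nil_of_not_mem hc]

theorem buildPalos_items (cartas : List (Int × String)) :
    (buildPalos cartas).items = groupItems cartas := by
  induction cartas using List.reverseRecOn with
  | nil => simp [buildPalos, groupItems, suitsOf, PySem.List.dedup, PySem.Dict.empty]
  | append_singleton l c ih =>
    unfold buildPalos at ih ⊢
    rw [List.foldl_append, List.foldl_cons, List.foldl_nil]
    exact step_items l c _ ih

-- ---- B-side: candidate bounds ----
theorem inner_mono (vi : Int) (pi : String) :
    ∀ (b : Int) (c : Int × String), b ≤ (if pi == c.2 then max b (20 + vi + c.1) else b) := by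
  intro b c
  split <;> simp

theorem stepB_mono (vals : List (Int × String)) :
    ∀ (b : Int) (ip : Int × (Int × String)), b ≤ stepB vals b ip := by
  intro b ip
  unfold stepB
  exact le_trans (le_max_left b ip.2.1) (le_foldl_of _ _ _ (inner_mono ip.2.1 ip.2.2))

theorem B_nonneg (cartas : List (Int × String)) : 0 ≤ calcular_puntaje_envido_alt cartas :=
  le_foldl_of _ _ _ (stepB_mono (valsOf cartas))

theorem enumerate_split (vals : List (Int × String)) (i : Nat) (hi : i < vals.length) :
    PySem.List.enumerate vals 0 =
      (PySem.List.enumerate vals 0).take i ++ ((i : Int), vals[i]) :: (PySem.List.enumerate vals 0).drop (i + 1) := by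
  have hlen : i < (PySem.List.enumerate vals 0).length := by
    rw [PySem.List.length_enumerate]; exact hi
  conv_lhs => rw [← List.take_append_drop i (PySem.List.enumerate vals 0)]
  rw [List.drop_eq_getElem_cons hlen, PySem.List.getElem_enumerate]
  norm_num

theorem slice_succ (vals : List (Int × String)) (i : Nat) :
    PySem.List.slice vals (some ((i : Int) + 1)) none = vals.drop (i + 1) := by
  have h : ((i : Int) + 1) = ((i + 1 : Nat) : Int) := by push_cast; ring
  rw [h, PySem.List.slice_from_natCast]

theorem le_B_single (cartas : List (Int × String)) (i : Nat) (hi : i < (valsOf cartas).length) :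
    ((valsOf cartas)[i]).1 ≤ calcular_puntaje_envido_alt cartas := by
  unfold calcular_puntaje_envido_alt
  rw [enumerate_split (valsOf cartas) i hi]
  refine foldl_reach _ _ _ _ _ _ (stepB_mono _) ?_
  intro b
  unfold stepB
  exact le_trans (le_max_right b _) (le_foldl_of _ _ _ (inner_mono _ _))

theorem le_B_pair (cartas : List (Int × String)) (i j : Nat) (hij : i < j)
    (hj : j < (valsOf cartas).length)
    (hp : ((valsOf cartas)[i]'(by omega)).2 = ((valsOf cartas)[j]).2) :
    20 + ((valsOf cartas)[i]'(by omega)).1 + ((valsOf cartas)[j]).1 ≤ calcular_puntaje_envido_alt cartas := by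
  unfold calcular_puntaje_envido_alt
  rw [enumerate_split (valsOf cartas) i (by omega)]
  refine foldl_reach _ _ _ _ _ _ (stepB_mono _) ?_
  intro b
  unfold stepB
  simp only
  rw [slice_succ]
  have hjd : j - (i + 1) < ((valsOf cartas).drop (i + 1)).length := by
    rw [List.length_drop]; omega
  have hgd : ((valsOf cartas).drop (i + 1))[j - (i + 1)] = (valsOf cartas)[j] := by
    rw [List.getElem_drop]
    congr 1
    omega
  conv_rhs => rw [← List.take_append_drop (j - (i+1)) ((valsOf cartas).drop (i+1))]
  rw [List.drop_eq_getElem_cons hjd, hgd]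
  refine foldl_reach _ _ _ _ _ _ (inner_mono _ _) ?_
  intro b'
  have hbe : ((valsOf cartas)[i]'(by omega)).2 == (valsOf cartas)[j].2 := by simp [hp]
  rw [if_pos hbe]
  exact le_max_right _ _

theorem B_le (cartas : List (Int × String)) (K : Int) (h0 : 0 ≤ K)
    (hv : ∀ (i : Nat) (hi : i < (valsOf cartas).length), ((valsOf cartas)[i]).1 ≤ K)
    (hp : ∀ (i j : Nat) (hij : i < j) (hj : j < (valsOf cartas).length),
      ((valsOf cartas)[i]'(by omega)).2 = ((valsOf cartas)[j]).2 →
      20 + ((valsOf cartas)[i]'(by omega)).1 + ((valsOf cartas)[j]).1 ≤ K) :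
    calcular_puntaje_envido_alt cartas ≤ K := by
  unfold calcular_puntaje_envido_alt
  refine foldl_le_of _ _ _ _ h0 ?_
  intro b x hx hb
  obtain ⟨k, hk, rfl⟩ := (PySem.List.mem_enumerate_iff _ _ _).mp hx
  unfold stepB
  simp only
  rw [show (0 : Int) + (k : Int) + 1 = ((k+1 : Nat) : Int) by push_cast; ring,
    PySem.List.slice_from_natCast]
  refine foldl_le_of _ _ _ _ (by simp [hb, hv k hk]) ?_
  intro b' c hc hb'
  obtain ⟨m, hm, rfl⟩ := List.mem_iff_getElem.mp hc
  rw [List.length_drop] at hm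
  rw [List.getElem_drop]
  split
  · rename_i hbeq
    have hsuit : ((valsOf cartas)[k]).2 = ((valsOf cartas)[k+1+m]'(by omega)).2 := by
      simpa using hbeq
    refine max_le hb' ?_
    exact hp k (k+1+m) (by omega) (by omega) hsuit
  · exact hb'

-- ---- A-side: candidate bounds ----
def scoreA (g : List Int) : Int :=
  if (g.length : Int) > 1 then
    20 + (PySem.List.pyGet? (PySem.List.sorted g (fun x => x) true) 0).getD 0
       + (PySem.List.pyGet? (PySem.List.sorted g (fun x => x) true) 1).getD 0
  else
    (PySem.List.pyGet? g 0).getD 0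

theorem stepA_eq (m : Int) (pg : String × List Int) : stepA m pg = max m (scoreA pg.2) := by
  unfold stepA scoreA
  split <;> rfl

theorem stepA_mono : ∀ (m : Int) (pg : String × List Int), m ≤ stepA m pg := by
  intro m pg
  rw [stepA_eq]
  exact le_max_left _ _

theorem A_eq (cartas : List (Int × String)) :
    calcular_puntaje_envido cartas = (groupItems cartas).foldl stepA 0 := by
  unfold calcular_puntaje_envido
  rw [buildPalos_items]

theorem A_nonneg (cartas : List (Int × String)) : 0 ≤ calcular_puntaje_envido cartas := by
  rw [A_eq]
  exact le_foldl_of _ _ _ stepA_mono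

theorem le_A_item (cartas : List (Int × String)) (pg : String × List Int)
    (hmem : pg ∈ groupItems cartas) : scoreA pg.2 ≤ calcular_puntaje_envido cartas := by
  rw [A_eq]
  obtain ⟨l1, l2, hsplit⟩ := List.append_of_mem hmem
  rw [hsplit]
  exact foldl_reach _ _ _ _ _ _ stepA_mono (fun b => by rw [stepA_eq]; exact le_max_right _ _)

theorem A_le (cartas : List (Int × String)) (K : Int) (h0 : 0 ≤ K)
    (hs : ∀ pg ∈ groupItems cartas, scoreA pg.2 ≤ K) : calcular_puntaje_envido cartas ≤ K := by
  rw [A_eq]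
  exact foldl_le_of _ _ _ _ h0 (fun b x hx hb => by rw [stepA_eq]; exact max_le hb (hs x hx))

-- ---- bridging facts between the two views ----
theorem grp_eq_valsOf (cartas : List (Int × String)) (p : String) :
    grp cartas p = ((valsOf cartas).filter (fun c => c.2 == p)).map Prod.fst := by
  unfold grp valsOf
  rw [List.filter_map, List.map_map]
  rfl

theorem mem_grp_bounds {cartas : List (Int × String)} {p : String} {x : Int}
    (h : x ∈ grp cartas p) : 0 ≤ x ∧ x ≤ 7 := by
  unfold grp at h
  obtain ⟨c, _, rfl⟩ := List.mem_map.mp h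
  exact envVal_bounds c.1

theorem grp_ne_nil {cartas : List (Int × String)} {p : String} (hp : p ∈ suitsOf cartas) :
    grp cartas p ≠ [] := by
  obtain ⟨c, hc, rfl⟩ := mem_suitsOf.mp hp
  unfold grp
  simp only [ne_eq, List.map_eq_nil_iff, List.filter_eq_nil_iff]
  intro h
  exact h c hc (by simp)

theorem singleton_of_short {g : List Int} (hne : g ≠ []) (hlen : ¬ ((g.length : Int) > 1)) :
    ∃ v, g = [v] := by
  match g with
  | [] => exact absurd rfl hne
  | [v] => exact ⟨v, rfl⟩
  | a :: b :: t => exfalso; simp at hlen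

theorem scoreA_big {g : List Int} (hlen : (g.length : Int) > 1) :
    ∃ a b t, PySem.List.sorted g (fun x => x) true = a :: b :: t ∧ scoreA g = 20 + a + b := by
  have hlen2 : 2 ≤ (PySem.List.sorted g (fun x => x) true).length := by
    rw [(PySem.List.sorted_perm g (fun x => x) true).length_eq]
    omega
  match hgs : PySem.List.sorted g (fun x => x) true, hlen2 with
  | a :: b :: t, _ =>
    refine ⟨a, b, t, rfl, ?_⟩
    unfold scoreA
    rw [if_pos hlen, hgs]
    have h0 : PySem.List.pyGet? (a :: b :: t) 0 = some a := PySem.List.pyGet?_zero_cons _ _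
    have h1 : PySem.List.pyGet? (a :: b :: t) 1 = some b := by
      have := PySem.List.pyGet?_ofNat (a :: b :: t) 1 (by simp)
      simpa using this
    rw [h0, h1]
    rfl

-- a pair drawn (with multiplicity) from suit p's group comes from two positions i < j of vals,
-- both of suit p
theorem pair_subperm_to_indices (cartas : List (Int × String)) (p : String) (a b : Int)
    (hsub : [a, b].Subperm (grp cartas p)) :
    ∃ i j, i < j ∧ ∃ hj : j < (valsOf cartas).length, ∃ hi : i < (valsOf cartas).length,
      ((valsOf cartas)[i]).2 = ((valsOf cartas)[j]).2 ∧
      ((valsOf cartas)[i]).1 + ((valsOf cartas)[j]).1 = a + b := by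
  rw [grp_eq_valsOf] at hsub
  obtain ⟨l', hperm, hsl⟩ := hsub
  obtain ⟨l2, hsl2, rfl⟩ := List.sublist_map_iff.mp hsl
  have hsum : (l2.map Prod.fst).sum = a + b := by
    rw [hperm.sum_eq]; simp
  have hlen2 : l2.length = 2 := by
    have := hperm.length_eq
    simpa using this
  match l2, hlen2 with
  | [c, d], _ =>
    have hcf : c ∈ (valsOf cartas).filter (fun c => c.2 == p) := hsl2.subset (by simp)
    have hdf : d ∈ (valsOf cartas).filter (fun c => c.2 == p) := hsl2.subset (by simp)
    have hcp : c.2 = p := by simpa using List.of_mem_filter hcf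
    have hdp : d.2 = p := by simpa using List.of_mem_filter hdf
    have hsl3 : [c, d].Sublist (valsOf cartas) := hsl2.trans List.filter_sublist
    obtain ⟨i, j, hij, hj, hi, hc, hd⟩ := sublist_pair_indices hsl3
    refine ⟨i, j, hij, hj, hi, ?_, ?_⟩
    · rw [hc, hd, hcp, hdp]
    · rw [hc, hd]
      simpa using hsum

theorem scoreA_le_B (cartas : List (Int × String)) (p : String) (hp : p ∈ suitsOf cartas) :
    scoreA (grp cartas p) ≤ calcular_puntaje_envido_alt cartas := by
  by_cases hlen : ((grp cartas p).length : Int) > 1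
  · obtain ⟨a, b, t, hgs, hsc⟩ := scoreA_big hlen
    rw [hsc]
    have hsubl : [a, b].Sublist (a :: b :: t) := ((List.nil_sublist t).cons₂ b).cons₂ a
    have hsubp : [a, b].Subperm (grp cartas p) := by
      refine (hsubl.subperm).trans ?_
      rw [← hgs]
      exact (PySem.List.sorted_perm _ _ _).subperm
    obtain ⟨i, j, hij, hj, hi, hsuit, hsum⟩ := pair_subperm_to_indices cartas p a b hsubp
    have := le_B_pair cartas i j hij hj hsuit
    omega
  · obtain ⟨v, hg⟩ := singleton_of_short (grp_ne_nil hp) hlen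
    unfold scoreA
    rw [if_neg hlen, hg, PySem.List.pyGet?_zero_cons]
    have hv : v ∈ grp cartas p := by rw [hg]; simp
    rw [grp_eq_valsOf] at hv
    obtain ⟨c, hcf, rfl⟩ := List.mem_map.mp hv
    have hcv : c ∈ valsOf cartas := List.mem_of_mem_filter hcf
    obtain ⟨i, hi, rfl⟩ := List.mem_iff_getElem.mp hcv
    simpa using le_B_single cartas i hi

theorem A_le_B (cartas : List (Int × String)) :
    calcular_puntaje_envido cartas ≤ calcular_puntaje_envido_alt cartas := by
  refine A_le cartas _ (B_nonneg cartas) ?_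
  intro pg hpg
  obtain ⟨p, hp, rfl⟩ := List.mem_map.mp hpg
  exact scoreA_le_B cartas p hp

theorem single_le_scoreA {cartas : List (Int × String)} {p : String} {v : Int}
    (hv : v ∈ grp cartas p) (hv7 : v ≤ 7) : v ≤ scoreA (grp cartas p) := by
  by_cases hlen : ((grp cartas p).length : Int) > 1
  · obtain ⟨a, b, t, hgs, hsc⟩ := scoreA_big hlen
    have ha : a ∈ grp cartas p := by
      rw [← PySem.List.mem_sorted (grp cartas p) (fun x => x) true, hgs]; simp
    have hb : b ∈ grp cartas p := by
      rw [← PySem.List.mem_sorted (grp cartas p) (fun x => x) true, hgs]; simp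
    have hab := mem_grp_bounds ha
    have hbb := mem_grp_bounds hb
    rw [hsc]
    omega
  · obtain ⟨w, hg⟩ := singleton_of_short (by intro h; rw [h] at hv; simp at hv) hlen
    have hvw : v = w := by rw [hg] at hv; simpa using hv
    unfold scoreA
    rw [if_neg hlen, hg, PySem.List.pyGet?_zero_cons, hvw]
    rfl

theorem B_le_A (cartas : List (Int × String)) :
    calcular_puntaje_envido_alt cartas ≤ calcular_puntaje_envido cartas := by
  refine B_le cartas _ (A_nonneg cartas) ?_ ?_
  · -- single values
    intro i hi
    have hival : (valsOf cartas)[i] = (envVal (cartas[i]'(by simpa [valsOf] using hi)).1,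
        (cartas[i]'(by simpa [valsOf] using hi)).2) := by
      simp [valsOf]
    have hic : (cartas[i]'(by simpa [valsOf] using hi)) ∈ cartas :=
      List.getElem_mem _
    set c := cartas[i]'(by simpa [valsOf] using hi) with hcdef
    have hps : c.2 ∈ suitsOf cartas := mem_suitsOf.mpr ⟨c, hic, rfl⟩
    have hitem : (c.2, grp cartas c.2) ∈ groupItems cartas := List.mem_map.mpr ⟨c.2, hps, rfl⟩
    have hvg : envVal c.1 ∈ grp cartas c.2 := by
      unfold grp
      exact List.mem_map.mpr ⟨c, List.mem_filter.mpr ⟨hic, by simp⟩, rfl⟩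
    have h1 : envVal c.1 ≤ scoreA (grp cartas c.2) :=
      single_le_scoreA hvg (envVal_bounds c.1).2
    have h2 := le_A_item cartas _ hitem
    rw [hival]
    exact le_trans h1 h2
  · -- pair values
    intro i j hij hj hsuit
    have hjc : j < cartas.length := by simpa [valsOf] using hj
    have hic : i < cartas.length := by omega
    have hsl : [(valsOf cartas)[i]'(by omega), (valsOf cartas)[j]].Sublist (valsOf cartas) :=
      pair_indices_sublist _ i j hij hj
    set p := ((valsOf cartas)[j]).2 with hpdef
    have hfpair : ([(valsOf cartas)[i]'(by omega), (valsOf cartas)[j]].filter (fun c => c.2 == p))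
        = [(valsOf cartas)[i]'(by omega), (valsOf cartas)[j]] := by
      have hb2 : ((valsOf cartas)[j]).2 == p := by rw [hpdef]; simp
      simp [List.filter, hsuit, hb2]
    have hslf : [(valsOf cartas)[i]'(by omega), (valsOf cartas)[j]].Sublist
        ((valsOf cartas).filter (fun c => c.2 == p)) := by
      have := hsl.filter (fun c => c.2 == p)
      rwa [hfpair] at this
    have hslg : [((valsOf cartas)[i]'(by omega)).1, ((valsOf cartas)[j]).1].Sublist (grp cartas p) := by
      rw [grp_eq_valsOf]
      simpa using hslf.map Prod.fst
    have hlen : ((grp cartas p).length : Int) > 1 := by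
      have := hslg.length_le
      simp at this
      omega
    obtain ⟨a, b, t, hgs, hsc⟩ := scoreA_big hlen
    have hsubp : [((valsOf cartas)[i]'(by omega)).1, ((valsOf cartas)[j]).1].Subperm (a :: b :: t) := by
      rw [← hgs]
      exact hslg.subperm.trans (PySem.List.sorted_perm _ _ _).symm.subperm
    have hpw : (a :: b :: t).Pairwise (fun x y => y ≤ x) := by
      have := PySem.List.sorted_pairwise_rev (grp cartas p) (fun x => x)
      rw [hgs] at this
      simpa using this
    have hbound := two_max_bound a b t _ _ hpw hsubp
    have hps : p ∈ suitsOf cartas := by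
      rw [hpdef]
      refine mem_suitsOf.mpr ⟨cartas[j], List.getElem_mem _, ?_⟩
      simp [valsOf]
    have hitem : (p, grp cartas p) ∈ groupItems cartas := List.mem_map.mpr ⟨p, hps, rfl⟩
    have h2 := le_A_item cartas _ hitem
    rw [hsc] at h2
    omega

-- ===== VERDICT (by name: the statement is the Claim_ definition above) =====
theorem calcular_puntaje_envido_spec : Claim_equal_calcular_puntaje_envido := by
  intro cartas _ _
  unfold Spec_calcular_puntaje_envido
  exact le_antisymm (A_le_B cartas) (B_le_A cartas)
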